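-- pv_equiv track=rewrite | github.com/mshnschnko/BigDataStats | lab3.py | turning_points
-- ===== SOURCE A (Python) =====
-- def turning_points(data):
--     p = 0
--     for i in range(len(data) - 2):
--         if data[i] < data[i+1] and data[i+1] > data[i+2]:
--             p += 1
--         if data[i] > data[i+1] and data[i+1] < data[i+2]:
--             p += 1
--     return p
-- ===== SOURCE B (Python) =====
-- def turning_points(data):
--     diffs = [data[i+1] - data[i] for i in range(len(data) - 1)]
--     return sum(1 for i in range(len(diffs) - 1) if diffs[i] * diffs[i+1] < 0)
-- ===== Notes on version B (the rewrite author's own statement) =====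
-- stated objective: alternative
-- what changed: B first materialises the consecutive-difference list, then counts adjacent sign changes via a negative-product test, instead of A's single loop with two three-point strict comparisons.
import Mathlib
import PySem

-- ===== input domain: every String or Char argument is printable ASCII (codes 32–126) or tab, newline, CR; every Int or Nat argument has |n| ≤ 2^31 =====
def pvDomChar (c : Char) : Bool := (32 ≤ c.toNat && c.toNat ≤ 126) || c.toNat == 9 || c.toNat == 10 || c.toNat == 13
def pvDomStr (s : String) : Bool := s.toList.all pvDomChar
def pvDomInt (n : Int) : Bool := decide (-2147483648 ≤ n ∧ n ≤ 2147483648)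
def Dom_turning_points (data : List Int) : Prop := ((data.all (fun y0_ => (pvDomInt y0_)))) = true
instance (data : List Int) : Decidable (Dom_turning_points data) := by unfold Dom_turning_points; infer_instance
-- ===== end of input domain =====

-- B computes the consecutive-difference list first and counts adjacent strict sign changes
-- by a negative-product test (alternative decomposition; same O(n) cost as A's three-point loop).


-- ===== PORT A =====
def turning_points (data : List Int) : Int :=
  (PySem.List.pyRange 0 ((data.length : Int) - 2) 1).foldl
    (fun p i =>
      let p := if PySem.List.pyGetD data i 0 < PySem.List.pyGetD data (i+1) 0 ∧
                  PySem.List.pyGetD data (i+1) 0 > PySem.List.pyGetD data (i+2) 0 then p + 1 else p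
      if PySem.List.pyGetD data i 0 > PySem.List.pyGetD data (i+1) 0 ∧
         PySem.List.pyGetD data (i+1) 0 < PySem.List.pyGetD data (i+2) 0 then p + 1 else p)
    0

-- ===== PORT B =====
def turning_points_alt (data : List Int) : Int :=
  let diffs := (PySem.List.pyRange 0 ((data.length : Int) - 1) 1).map
    (fun i => PySem.List.pyGetD data (i+1) 0 - PySem.List.pyGetD data i 0)
  (PySem.List.pyRange 0 ((diffs.length : Int) - 1) 1).foldl
    (fun s i => if PySem.List.pyGetD diffs i 0 * PySem.List.pyGetD diffs (i+1) 0 < 0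
                then s + 1 else s)
    0

-- ===== PRECONDITION & SPEC =====
def Spec_turning_points (data : List Int) (out : Int) : Prop := out = turning_points_alt data
instance (data : List Int) (out : Int) : Decidable (Spec_turning_points data out) := by unfold Spec_turning_points; infer_instance

-- ===== CLAIM (what is proved, stated in full; the proofs are below) =====
def Claim_equal_turning_points : Prop := ∀ (data : List Int), Dom_turning_points data → Spec_turning_points data (turning_points data)

-- ===== LEMMAS AND PROOFS =====

-- pointwise: A's two strict three-point tests count exactly the sign-change products
theorem pv_pointwise (a b c : Int) :
    ((if a < b ∧ c < b then (1:Int) else 0) + (if b < a ∧ b < c then (1:Int) else 0))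
      = (if (c - b) * (b - a) < 0 then (1:Int) else 0) := by
  simp only [mul_neg_iff]
  split_ifs <;> omega

theorem turning_points_eq_sum (data : List Int) :
    turning_points data =
      ((PySem.List.pyRange 0 ((data.length : Int) - 2) 1).map
        (fun i => ((if PySem.List.pyGetD data i 0 < PySem.List.pyGetD data (i+1) 0 ∧
                       PySem.List.pyGetD data (i+2) 0 < PySem.List.pyGetD data (i+1) 0 then (1:Int) else 0)
                   + (if PySem.List.pyGetD data (i+1) 0 < PySem.List.pyGetD data i 0 ∧
                         PySem.List.pyGetD data (i+1) 0 < PySem.List.pyGetD data (i+2) 0 then (1:Int) else 0)))).sum := by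
  unfold turning_points
  rw [show (fun p i =>
      let p := if PySem.List.pyGetD data i 0 < PySem.List.pyGetD data (i+1) 0 ∧
                  PySem.List.pyGetD data (i+1) 0 > PySem.List.pyGetD data (i+2) 0 then p + 1 else p
      if PySem.List.pyGetD data i 0 > PySem.List.pyGetD data (i+1) 0 ∧
         PySem.List.pyGetD data (i+1) 0 < PySem.List.pyGetD data (i+2) 0 then p + 1 else p)
    = (fun (p : Int) i => p +
        ((if PySem.List.pyGetD data i 0 < PySem.List.pyGetD data (i+1) 0 ∧
             PySem.List.pyGetD data (i+2) 0 < PySem.List.pyGetD data (i+1) 0 then (1:Int) else 0)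
         + (if PySem.List.pyGetD data (i+1) 0 < PySem.List.pyGetD data i 0 ∧
               PySem.List.pyGetD data (i+1) 0 < PySem.List.pyGetD data (i+2) 0 then (1:Int) else 0)))
    from by funext p i; simp only [GT.gt]; split_ifs <;> omega]
  rw [PySem.List.foldl_add]
  simp

theorem turning_points_alt_eq_sum (data : List Int) :
    turning_points_alt data =
      ((PySem.List.pyRange 0 ((data.length : Int) - 2) 1).map
        (fun i => (if (PySem.List.pyGetD data (i+2) 0 - PySem.List.pyGetD data (i+1) 0)
                      * (PySem.List.pyGetD data (i+1) 0 - PySem.List.pyGetD data i 0) < 0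
                   then (1:Int) else 0))).sum := by
  unfold turning_points_alt
  simp only [List.length_map, PySem.List.length_pyRange_one]
  have hlen : ((((data.length : Int) - 1 - 0).toNat : Int) - 1) = (data.length : Int) - 2 ∨
      (PySem.List.pyRange 0 ((((data.length : Int) - 1 - 0).toNat : Int) - 1) 1 = [] ∧
       PySem.List.pyRange 0 ((data.length : Int) - 2) 1 = []) := by
    rcases data with _ | ⟨x, t⟩
    · right
      constructor <;> · apply PySem.List.pyRange_one_eq_nil; simp
    · left; simp; omega
  rcases hlen with h | ⟨h1, h2⟩
  · rw [h]
    rw [show (fun (s : Int) i =>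
          if PySem.List.pyGetD ((PySem.List.pyRange 0 ((data.length : Int) - 1) 1).map
                (fun i => PySem.List.pyGetD data (i+1) 0 - PySem.List.pyGetD data i 0)) i 0 *
             PySem.List.pyGetD ((PySem.List.pyRange 0 ((data.length : Int) - 1) 1).map
                (fun i => PySem.List.pyGetD data (i+1) 0 - PySem.List.pyGetD data i 0)) (i+1) 0 < 0
          then s + 1 else s)
        = (fun (s : Int) i =>
            if PySem.List.pyGetD ((PySem.List.pyRange 0 ((data.length : Int) - 1) 1).map
                  (fun i => PySem.List.pyGetD data (i+1) 0 - PySem.List.pyGetD data i 0)) i 0 *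
               PySem.List.pyGetD ((PySem.List.pyRange 0 ((data.length : Int) - 1) 1).map
                  (fun i => PySem.List.pyGetD data (i+1) 0 - PySem.List.pyGetD data i 0)) (i+1) 0 < 0
            then s + (1:Int) else s + 0) from by funext s i; split_ifs <;> omega]
    rw [show (fun (s : Int) i =>
            if PySem.List.pyGetD ((PySem.List.pyRange 0 ((data.length : Int) - 1) 1).map
                  (fun i => PySem.List.pyGetD data (i+1) 0 - PySem.List.pyGetD data i 0)) i 0 *
               PySem.List.pyGetD ((PySem.List.pyRange 0 ((data.length : Int) - 1) 1).map
                  (fun i => PySem.List.pyGetD data (i+1) 0 - PySem.List.pyGetD data i 0)) (i+1) 0 < 0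
            then s + (1:Int) else s + 0)
        = (fun (s : Int) i => s +
            (if PySem.List.pyGetD ((PySem.List.pyRange 0 ((data.length : Int) - 1) 1).map
                  (fun i => PySem.List.pyGetD data (i+1) 0 - PySem.List.pyGetD data i 0)) i 0 *
               PySem.List.pyGetD ((PySem.List.pyRange 0 ((data.length : Int) - 1) 1).map
                  (fun i => PySem.List.pyGetD data (i+1) 0 - PySem.List.pyGetD data i 0)) (i+1) 0 < 0
             then (1:Int) else 0)) from by funext s i; split_ifs <;> rfl]
    rw [PySem.List.foldl_add]
    simp only [zero_add]
    apply congrArg List.sum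
    apply List.map_congr_left
    intro i hi
    have hmem := (PySem.List.mem_pyRange_one).1 hi
    have h1 : PySem.List.pyGetD ((PySem.List.pyRange 0 ((data.length : Int) - 1) 1).map
          (fun i => PySem.List.pyGetD data (i+1) 0 - PySem.List.pyGetD data i 0)) i 0
        = PySem.List.pyGetD data (i+1) 0 - PySem.List.pyGetD data i 0 :=
      PySem.List.pyGetD_map_pyRange_of_nonneg _ _ _ _ hmem.1 (by omega)
    have h2 : PySem.List.pyGetD ((PySem.List.pyRange 0 ((data.length : Int) - 1) 1).map
          (fun i => PySem.List.pyGetD data (i+1) 0 - PySem.List.pyGetD data i 0)) (i+1) 0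
        = PySem.List.pyGetD data (i+1+1) 0 - PySem.List.pyGetD data (i+1) 0 :=
      PySem.List.pyGetD_map_pyRange_of_nonneg _ _ _ _ (by omega) (by omega)
    rw [h1, h2]
    have : i + 1 + 1 = i + 2 := by ring
    rw [this, mul_comm]
  · rw [h1, h2]; simp

-- ===== VERDICT (by name: the statement is the Claim_ definition above) =====
theorem turning_points_spec : Claim_equal_turning_points := by
  intro data _
  unfold Spec_turning_points
  rw [turning_points_eq_sum, turning_points_alt_eq_sum]
  apply congrArg List.sum
  apply List.map_congr_left
  intro i _
  exact pv_pointwise _ _ _
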